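-- pv_equiv track=rewrite | github.com/MITgcm/MITgcm | verification/iceberg_verify/input/buildScript.py | find_closest_indices
-- ===== SOURCE A (Python) =====
-- from bisect import bisect_left
--
-- def find_closest_indices(sorted_A, sorted_B):
--     closest_indices = []
--     for a in sorted_A:
--         pos = bisect_left(sorted_B, a)  # Find position in B where a would fit
--         # Compare neighbors to find the closest
--         if pos == 0:
--             closest_indices.append(0)
--         elif pos == len(sorted_B):
--             closest_indices.append(len(sorted_B) - 1)
--         else:
--             before = pos - 1
--             after = pos
--             closest_indices.append(before if abs(sorted_B[before] - a) <= abs(sorted_B[after] - a) else after)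
--     return closest_indices
-- ===== SOURCE B (Python) =====
-- def find_closest_indices(sorted_A, sorted_B):
--     # one recursive function fuses the position search with the neighbour choice;
--     # the search itself guarantees sorted_B[lo-1] < a <= sorted_B[lo], so no abs() is needed
--     m = len(sorted_B)
--
--     def pick(a, lo, hi):
--         if lo < hi:
--             half = (hi - lo) // 2
--             mid = lo + half
--             if sorted_B[mid] < a:
--                 return pick(a, mid + 1, hi)
--             return pick(a, lo, mid)
--         if lo == 0:
--             return 0
--         if lo == m:
--             return m - 1
--         return lo - 1 if a - sorted_B[lo - 1] <= sorted_B[lo] - a else lo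
--
--     return [pick(a, 0, m) for a in sorted_A]
-- ===== Notes on version B (the rewrite author's own statement) =====
-- stated objective: simpler
-- what changed: one self-contained recursive function fuses the position search with the neighbour choice and drops both the bisect library call and the abs() calls, using the search's own invariant sorted_B[pos-1] < a <= sorted_B[pos]
import Mathlib
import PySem

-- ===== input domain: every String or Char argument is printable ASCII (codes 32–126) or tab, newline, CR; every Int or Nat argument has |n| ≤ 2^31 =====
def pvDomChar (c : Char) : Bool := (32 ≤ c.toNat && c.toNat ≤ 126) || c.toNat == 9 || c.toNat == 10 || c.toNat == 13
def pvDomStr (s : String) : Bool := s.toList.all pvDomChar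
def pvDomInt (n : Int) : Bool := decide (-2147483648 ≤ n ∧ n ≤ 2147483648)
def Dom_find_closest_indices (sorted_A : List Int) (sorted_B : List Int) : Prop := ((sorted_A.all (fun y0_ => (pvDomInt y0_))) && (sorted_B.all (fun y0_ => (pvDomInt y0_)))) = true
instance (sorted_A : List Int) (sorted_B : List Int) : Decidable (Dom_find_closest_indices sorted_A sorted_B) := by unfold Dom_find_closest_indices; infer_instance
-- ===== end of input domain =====

-- B fuses the position search and the neighbour choice into one recursive function and drops
-- the abs() calls using the search's own invariant (objective: simpler; same asymptotic cost).

-- ===== PORT A =====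
-- bisect.bisect_left, transliterated: while lo < hi: mid = (lo+hi)//2; if B[mid] < a: lo = mid+1 else hi = mid
def pvBisectLoop (B : List Int) (a : Int) (lo hi : Nat) : Nat :=
  if _h : lo < hi then
    let mid := (lo + hi) / 2
    if B.getD mid 0 < a then pvBisectLoop B a (mid + 1) hi
    else pvBisectLoop B a lo mid
  else lo
termination_by hi - lo
decreasing_by all_goals omega

def find_closest_indices (sorted_A : List Int) (sorted_B : List Int) : List Int :=
  sorted_A.foldl (fun closest_indices a =>
    let pos := pvBisectLoop sorted_B a 0 sorted_B.length
    if pos = 0 then closest_indices ++ [(0 : Int)]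
    else if pos = sorted_B.length then closest_indices ++ [(sorted_B.length : Int) - 1]
    else
      let before := pos - 1
      let after := pos
      closest_indices ++
        [if |sorted_B.getD before 0 - a| ≤ |sorted_B.getD after 0 - a| then (before : Int) else (after : Int)]) []

-- ===== PORT B =====
-- pick(a, lo, hi): recursive binary descent, the neighbour choice is its base case (no abs)
def pvPick (B : List Int) (a : Int) (lo hi : Nat) : Nat :=
  if _h : lo < hi then
    let half := (hi - lo) / 2
    let mid := lo + half
    if B.getD mid 0 < a then pvPick B a (mid + 1) hi
    else pvPick B a lo mid
  else
    if lo = 0 then 0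
    else if lo = B.length then B.length - 1
    else if a - B.getD (lo - 1) 0 ≤ B.getD lo 0 - a then lo - 1 else lo
termination_by hi - lo
decreasing_by all_goals omega

def find_closest_indices_alt (sorted_A : List Int) (sorted_B : List Int) : List Int :=
  sorted_A.map (fun a => (pvPick sorted_B a 0 sorted_B.length : Int))

-- ===== PRECONDITION & SPEC =====
-- (A is total: no Pre_)
def Spec_find_closest_indices (sorted_A : List Int) (sorted_B : List Int) (out : List Int) : Prop := out = find_closest_indices_alt sorted_A sorted_B
instance (sorted_A : List Int) (sorted_B : List Int) (out : List Int) : Decidable (Spec_find_closest_indices sorted_A sorted_B out) := by unfold Spec_find_closest_indices; infer_instance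

-- ===== CLAIM (what is proved, stated in full; the proofs are below) =====
def Claim_equal_find_closest_indices : Prop := ∀ (sorted_A : List Int) (sorted_B : List Int), Dom_find_closest_indices sorted_A sorted_B → Spec_find_closest_indices sorted_A sorted_B (find_closest_indices sorted_A sorted_B)

-- ===== LEMMAS AND PROOFS =====

-- the neighbour choice A performs after the search, with abs already resolved
def pvBase (B : List Int) (a : Int) (p : Nat) : Nat :=
  if p = 0 then 0
  else if p = B.length then B.length - 1
  else if a - B.getD (p - 1) 0 ≤ B.getD p 0 - a then p - 1 else p

-- B's recursion is A's binary search followed by the base-case choice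
theorem pvPick_eq_base (B : List Int) (a : Int) :
    ∀ lo hi, pvPick B a lo hi = pvBase B a (pvBisectLoop B a lo hi) := by
  intro lo hi
  induction hn : hi - lo using Nat.strong_induction_on generalizing lo hi with
  | _ n ih =>
    rw [pvPick, pvBisectLoop]
    by_cases h : lo < hi
    · rw [dif_pos h, dif_pos h]
      have hm : lo + (hi - lo) / 2 = (lo + hi) / 2 := by omega
      show (if B.getD (lo + (hi - lo) / 2) 0 < a then pvPick B a (lo + (hi - lo) / 2 + 1) hi
            else pvPick B a lo (lo + (hi - lo) / 2))
          = pvBase B a (if B.getD ((lo + hi) / 2) 0 < a then pvBisectLoop B a ((lo + hi) / 2 + 1) hi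
            else pvBisectLoop B a lo ((lo + hi) / 2))
      rw [hm]
      by_cases hc : B.getD ((lo + hi) / 2) 0 < a
      · rw [if_pos hc, if_pos hc]
        exact ih (hi - ((lo + hi) / 2 + 1)) (by omega) _ _ rfl
      · rw [if_neg hc, if_neg hc]
        exact ih ((lo + hi) / 2 - lo) (by omega) _ _ rfl
    · rw [dif_neg h, dif_neg h]
      rfl

-- invariants of the binary search, valid for ARBITRARY B: the final position p satisfies
-- lo ≤ p ≤ hi, B[p-1] < a (unless p = 0) and a ≤ B[p] (unless p = hi = length),
-- because those entries were probed
theorem pvBis_inv (B : List Int) (a : Int) :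
    ∀ lo hi, lo ≤ hi → hi ≤ B.length →
      (lo = 0 ∨ B.getD (lo - 1) 0 < a) → (hi = B.length ∨ a ≤ B.getD hi 0) →
      lo ≤ pvBisectLoop B a lo hi ∧ pvBisectLoop B a lo hi ≤ hi ∧
      (pvBisectLoop B a lo hi = 0 ∨ B.getD (pvBisectLoop B a lo hi - 1) 0 < a) ∧
      (pvBisectLoop B a lo hi = B.length ∨ a ≤ B.getD (pvBisectLoop B a lo hi) 0) := by
  intro lo hi
  induction hn : hi - lo using Nat.strong_induction_on generalizing lo hi with
  | _ n ih =>
    intro hle hhi hlo0 hhim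
    rw [pvBisectLoop]
    by_cases h : lo < hi
    · rw [dif_pos h]
      have hmlt : (lo + hi) / 2 < hi := by omega
      have hmge : lo ≤ (lo + hi) / 2 := by omega
      show (lo ≤ if B.getD ((lo + hi) / 2) 0 < a then pvBisectLoop B a ((lo + hi) / 2 + 1) hi
              else pvBisectLoop B a lo ((lo + hi) / 2)) ∧ _
      by_cases hc : B.getD ((lo + hi) / 2) 0 < a
      · rw [if_pos hc]
        have := ih (hi - ((lo + hi) / 2 + 1)) (by omega) ((lo + hi) / 2 + 1) hi rfl
          (by omega) hhi (Or.inr (by simpa using hc)) hhim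
        exact ⟨by omega, this.2.1, this.2.2.1, this.2.2.2⟩
      · rw [if_neg hc]
        have := ih ((lo + hi) / 2 - lo) (by omega) lo ((lo + hi) / 2) rfl
          hmge (by omega) hlo0 (Or.inr (by omega))
        exact ⟨this.1, by omega, this.2.2.1, this.2.2.2⟩
    · rw [dif_neg h]
      have : lo = hi := by omega
      subst this
      exact ⟨le_refl _, le_refl _, hlo0, hhim⟩

-- A's per-element value equals (pvBase of the search : Int), for arbitrary B
theorem pvA_elem (B : List Int) (a : Int) :
    (let pos := pvBisectLoop B a 0 B.length
     if pos = 0 then (0 : Int)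
     else if pos = B.length then (B.length : Int) - 1
     else if |B.getD (pos - 1) 0 - a| ≤ |B.getD pos 0 - a| then ((pos - 1 : Nat) : Int) else (pos : Int))
    = (pvBase B a (pvBisectLoop B a 0 B.length) : Int) := by
  have hinv := pvBis_inv B a 0 B.length (by omega) (le_refl _) (Or.inl rfl) (Or.inl rfl)
  rcases hinv with ⟨-, hub, hlo, hhi⟩
  unfold pvBase
  by_cases h0 : pvBisectLoop B a 0 B.length = 0
  · rw [if_pos h0, if_pos h0]; simp
  · rw [if_neg h0, if_neg h0]
    by_cases hm : pvBisectLoop B a 0 B.length = B.length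
    · rw [if_pos hm, if_pos hm]
      have hlen : 1 ≤ B.length := by omega
      omega
    · rw [if_neg hm, if_neg hm]
      have hbefore : B.getD (pvBisectLoop B a 0 B.length - 1) 0 < a := by tauto
      have hafter : a ≤ B.getD (pvBisectLoop B a 0 B.length) 0 := by tauto
      rw [abs_of_neg (by omega), abs_of_nonneg (by omega)]
      by_cases hc : a - B.getD (pvBisectLoop B a 0 B.length - 1) 0
          ≤ B.getD (pvBisectLoop B a 0 B.length) 0 - a
      · rw [if_pos (by omega), if_pos hc]
      · rw [if_neg (by omega), if_neg hc]

-- the A-side fold appends one element per a: rewrite it as map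
theorem pvA_fold (f : Int → Int) :
    ∀ (A acc : List Int),
      (A.foldl (fun closest_indices a => closest_indices ++ [f a]) acc) = acc ++ A.map f := by
  intro A
  induction A with
  | nil => simp
  | cons a t ih => intro acc; simp [List.foldl_cons, ih]

-- ===== VERDICT (by name: the statement is the Claim_ definition above) =====
theorem find_closest_indices_spec : Claim_equal_find_closest_indices := by
  intro A B _hdom
  unfold Spec_find_closest_indices find_closest_indices find_closest_indices_alt
  rw [show (fun (closest_indices : List Int) (a : Int) =>
        let pos := pvBisectLoop B a 0 B.length
        if pos = 0 then closest_indices ++ [(0 : Int)]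
        else if pos = B.length then closest_indices ++ [(B.length : Int) - 1]
        else
          let before := pos - 1
          let after := pos
          closest_indices ++
            [if |B.getD before 0 - a| ≤ |B.getD after 0 - a| then (before : Int) else (after : Int)])
      = fun closest_indices a => closest_indices ++
          [let pos := pvBisectLoop B a 0 B.length
           if pos = 0 then (0 : Int)
           else if pos = B.length then (B.length : Int) - 1
           else if |B.getD (pos - 1) 0 - a| ≤ |B.getD pos 0 - a| then ((pos - 1 : Nat) : Int) else (pos : Int)
          ] from by
      funext ci a
      simp only []
      split_ifs <;> rfl]
  rw [pvA_fold]
  simp only [List.nil_append]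
  apply List.map_congr_left
  intro a _
  rw [pvA_elem B a, pvPick_eq_base B a]
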